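-- pv_equiv track=rewrite | github.com/cmelloq/calculadoraCondicional | calculadoracraft.py | calcular_sequencia
-- ===== SOURCE A (Python) =====
-- def calcular_sequencia(numero_desejado, sequencia_final):
--     numero_pre_calculo = numero_desejado - sum(sequencia_final)
--
--     botoes_positivos = [16, 13, 7, 2]
--     botoes_negativos = [-15, -9, -6, -3]
--
--     resultado = []
--     valor_atual = 0
--
--     while valor_atual != numero_pre_calculo:
--         if valor_atual < numero_pre_calculo:
--             adicionado = False
--             for botao in sorted(botoes_positivos, reverse=True):
--                 if valor_atual + botao <= numero_pre_calculo:
--                     valor_atual += botao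
--                     resultado.append(f"+{botao}")
--                     adicionado = True
--                     break
--             if not adicionado:
--                 break
--         elif valor_atual > numero_pre_calculo:
--             subtraido = False
--             for botao in sorted(botoes_negativos):
--                 if valor_atual + botao >= numero_pre_calculo:
--                     valor_atual += botao
--                     resultado.append(f"{botao}")
--                     subtraido = True
--                     break
--             if not subtraido:
--                 break
--
--  # Aplicando a sequência final
--     for move in sequencia_final:
--         if move > 0:
--             resultado.append(f"+{move}")  # Adiciona '+' explicitamente para números positivos
--         else:
--             resultado.append(str(move))  # Números negativos já têm o '-' automaticamente
--
--         valor_atual += move  # Aplica o valor da sequência final ao cálculo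
--
--     return resultado, valor_atual
-- ===== SOURCE B (Python) =====
-- def calcular_sequencia(numero_desejado, sequencia_final):
--     pre = numero_desejado - sum(sequencia_final)
--     resultado = []
--     if pre > 0:
--         m = pre
--         for b in (16, 13, 7, 2):
--             q, m = divmod(m, b)
--             resultado += [f"+{b}"] * q
--         valor_atual = pre - m
--     elif pre < 0:
--         m = -pre
--         for b in (15, 9, 6, 3):
--             q, m = divmod(m, b)
--             resultado += [f"-{b}"] * q
--         valor_atual = pre + m
--     else:
--         valor_atual = 0
--     for move in sequencia_final:
--         resultado.append(f"+{move}" if move > 0 else str(move))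
--         valor_atual += move
--     return resultado, valor_atual
-- ===== Notes on version B (the rewrite author's own statement) =====
-- stated objective: faster
-- what changed: Replaces A's one-button-per-iteration greedy while-loop with a closed-form division cascade: for each button magnitude in descending order it emits count = remaining // button presses at once (divmod), so proportional-to-target iteration disappears.
import Mathlib
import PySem

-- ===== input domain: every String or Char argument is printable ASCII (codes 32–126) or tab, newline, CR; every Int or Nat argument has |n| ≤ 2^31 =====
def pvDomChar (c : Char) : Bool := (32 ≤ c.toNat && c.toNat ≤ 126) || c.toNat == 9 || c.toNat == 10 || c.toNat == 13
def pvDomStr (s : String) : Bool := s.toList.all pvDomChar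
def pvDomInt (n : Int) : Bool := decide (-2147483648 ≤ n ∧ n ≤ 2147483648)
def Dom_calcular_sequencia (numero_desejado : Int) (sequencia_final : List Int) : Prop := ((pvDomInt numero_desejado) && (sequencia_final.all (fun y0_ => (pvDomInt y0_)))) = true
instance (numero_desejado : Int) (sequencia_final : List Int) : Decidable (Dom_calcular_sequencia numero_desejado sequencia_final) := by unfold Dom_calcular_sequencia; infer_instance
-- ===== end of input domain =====

-- B replaces A's one-button-at-a-time greedy while-loop by a closed-form division cascade
-- (count = remaining // button for each button magnitude in descending order); objective: faster.

-- ===== PORT A =====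
-- the while-loop of A: each iteration tries the buttons in sorted order and either presses one or breaks
def calcA_loop (target valor : Int) (acc : List String) : List String × Int :=
  if valor = target then (acc, valor)
  else if valor < target then
    if valor + 16 ≤ target then calcA_loop target (valor + 16) (acc ++ ["+16"])
    else if valor + 13 ≤ target then calcA_loop target (valor + 13) (acc ++ ["+13"])
    else if valor + 7 ≤ target then calcA_loop target (valor + 7) (acc ++ ["+7"])
    else if valor + 2 ≤ target then calcA_loop target (valor + 2) (acc ++ ["+2"])
    else (acc, valor)
  else
    if target ≤ valor + -15 then calcA_loop target (valor + -15) (acc ++ ["-15"])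
    else if target ≤ valor + -9 then calcA_loop target (valor + -9) (acc ++ ["-9"])
    else if target ≤ valor + -6 then calcA_loop target (valor + -6) (acc ++ ["-6"])
    else if target ≤ valor + -3 then calcA_loop target (valor + -3) (acc ++ ["-3"])
    else (acc, valor)
termination_by (target - valor).natAbs
decreasing_by all_goals omega

def calcular_sequencia (numero_desejado : Int) (sequencia_final : List Int) : List String × Int :=
  let numero_pre_calculo := numero_desejado - sequencia_final.sum
  let p := calcA_loop numero_pre_calculo 0 []
  sequencia_final.foldl
    (fun p move =>
      (p.1 ++ [if 0 < move then "+" ++ PySem.Int.toStr move else PySem.Int.toStr move], p.2 + move))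
    p

-- ===== PORT B =====
-- for b in bs: q, m = divmod(m, b); resultado += [f(b)] * q
def calcB_digits (m : Int) (bs : List Int) (f : Int → String) : List String × Int :=
  bs.foldl
    (fun p b => (p.1 ++ List.replicate (PySem.Int.floordiv p.2 b).toNat (f b), PySem.Int.mod p.2 b))
    ([], m)

def calcular_sequencia_alt (numero_desejado : Int) (sequencia_final : List Int) : List String × Int :=
  let pre := numero_desejado - sequencia_final.sum
  let start :=
    if 0 < pre then
      let p := calcB_digits pre [16, 13, 7, 2] (fun b => "+" ++ PySem.Int.toStr b)
      (p.1, pre - p.2)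
    else if pre < 0 then
      let p := calcB_digits (-pre) [15, 9, 6, 3] (fun b => "-" ++ PySem.Int.toStr b)
      (p.1, pre + p.2)
    else ([], (0 : Int))
  sequencia_final.foldl
    (fun p move =>
      (p.1 ++ [if 0 < move then "+" ++ PySem.Int.toStr move else PySem.Int.toStr move], p.2 + move))
    start

-- ===== PRECONDITION & SPEC =====
def Spec_calcular_sequencia (numero_desejado : Int) (sequencia_final : List Int) (out : List String × Int) : Prop := out = calcular_sequencia_alt numero_desejado sequencia_final
instance (numero_desejado : Int) (sequencia_final : List Int) (out : List String × Int) : Decidable (Spec_calcular_sequencia numero_desejado sequencia_final out) := by unfold Spec_calcular_sequencia; infer_instance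

-- ===== CLAIM (what is proved, stated in full; the proofs are below) =====
def Claim_equal_calcular_sequencia : Prop := ∀ (numero_desejado : Int) (sequencia_final : List Int), Dom_calcular_sequencia numero_desejado sequencia_final → Spec_calcular_sequencia numero_desejado sequencia_final (calcular_sequencia numero_desejado sequencia_final)

-- ===== LEMMAS AND PROOFS =====

lemma calcB_acc (bs : List Int) (f : Int → String) (acc : List String) (m : Int) :
    List.foldl
      (fun p b => (p.1 ++ List.replicate (PySem.Int.floordiv p.2 b).toNat (f b), PySem.Int.mod p.2 b))
      (acc, m) bs
    = (acc ++ (calcB_digits m bs f).1, (calcB_digits m bs f).2) := by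
  induction bs generalizing acc m with
  | nil => simp [calcB_digits]
  | cons b bs ih =>
      rw [List.foldl_cons, ih]
      conv_rhs => rw [calcB_digits, List.foldl_cons, ih]
      simp [List.append_assoc]

lemma calcB_nil (m : Int) (f : Int → String) : calcB_digits m [] f = ([], m) := rfl

lemma calcB_cons (m b : Int) (bs : List Int) (f : Int → String) :
    calcB_digits m (b :: bs) f
    = (List.replicate (PySem.Int.floordiv m b).toNat (f b) ++ (calcB_digits (PySem.Int.mod m b) bs f).1,
       (calcB_digits (PySem.Int.mod m b) bs f).2) := by
  conv_lhs => rw [calcB_digits, List.foldl_cons, calcB_acc]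
  simp

lemma calcB_take (m b : Int) (bs : List Int) (f : Int → String) (hb : 0 < b) (hm : b ≤ m) :
    calcB_digits m (b :: bs) f
    = (f b :: (calcB_digits (m - b) (b :: bs) f).1, (calcB_digits (m - b) (b :: bs) f).2) := by
  have hfd : PySem.Int.floordiv m b = PySem.Int.floordiv (m - b) b + 1 := by
    rw [PySem.Int.floordiv_eq_ediv_of_pos hb, PySem.Int.floordiv_eq_ediv_of_pos hb]
    have h := Int.add_mul_ediv_right (m - b) 1 (show b ≠ 0 by omega)
    have he : m - b + 1 * b = m := by ring
    rw [he] at h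
    omega
  have hmd : PySem.Int.mod m b = PySem.Int.mod (m - b) b := by
    rw [PySem.Int.mod_eq_emod_of_pos hb, PySem.Int.mod_eq_emod_of_pos hb]
    have h := Int.add_mul_emod_self_right (a := m - b) (b := 1) (c := b)
    have he : m - b + 1 * b = m := by ring
    rw [he] at h
    rw [h]
  have hnn : 0 ≤ PySem.Int.floordiv (m - b) b := by
    rw [PySem.Int.floordiv_eq_ediv_of_pos hb]
    exact Int.ediv_nonneg (by omega) (by omega)
  have ht : (PySem.Int.floordiv (m - b) b + 1).toNat = (PySem.Int.floordiv (m - b) b).toNat + 1 := by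
    omega
  rw [calcB_cons, calcB_cons (m - b) b, hfd, hmd, ht, List.replicate_succ]
  simp

lemma calcB_skip (m b : Int) (bs : List Int) (f : Int → String) (h0 : 0 ≤ m) (hm : m < b) :
    calcB_digits m (b :: bs) f = calcB_digits m bs f := by
  have hb : 0 < b := by omega
  have hfd : PySem.Int.floordiv m b = 0 := by
    rw [PySem.Int.floordiv_eq_ediv_of_pos hb]
    exact Int.ediv_eq_zero_of_lt h0 hm
  have hmd : PySem.Int.mod m b = m := by
    rw [PySem.Int.mod_eq_emod_of_pos hb]
    exact Int.emod_eq_of_lt h0 hm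
  rw [calcB_cons, hfd, hmd]
  simp

lemma greedy_pos (n : Nat) : ∀ (t : Int) (acc : List String),
    calcA_loop t (t - n) acc
    = (acc ++ (calcB_digits n [16, 13, 7, 2] (fun b => "+" ++ PySem.Int.toStr b)).1,
       t - (calcB_digits n [16, 13, 7, 2] (fun b => "+" ++ PySem.Int.toStr b)).2) := by
  induction n using Nat.strong_induction_on with
  | _ n ih =>
    intro t acc
    by_cases h16 : 16 ≤ n
    · rw [calcA_loop, if_neg (by omega), if_pos (by omega), if_pos (by omega)]
      have hc : t - (n : Int) + 16 = t - ((n - 16 : Nat) : Int) := by omega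
      rw [hc, ih (n - 16) (by omega)]
      rw [calcB_take (n : Int) 16 _ _ (by norm_num) (by exact_mod_cast h16)]
      have hc2 : ((n : Int) - 16) = ((n - 16 : Nat) : Int) := by omega
      rw [hc2]
      have hf : ("+" ++ PySem.Int.toStr 16) = "+16" := by decide
      simp [hf, List.append_assoc]
    · by_cases h13 : 13 ≤ n
      · rw [calcA_loop, if_neg (by omega), if_pos (by omega), if_neg (by omega), if_pos (by omega)]
        have hc : t - (n : Int) + 13 = t - ((n - 13 : Nat) : Int) := by omega
        rw [hc, ih (n - 13) (by omega)]
        rw [calcB_skip (n : Int) 16 _ _ (by omega) (by omega),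
            calcB_take (n : Int) 13 _ _ (by norm_num) (by exact_mod_cast h13)]
        have hc2 : ((n : Int) - 13) = ((n - 13 : Nat) : Int) := by omega
        rw [hc2, calcB_skip ((n - 13 : Nat) : Int) 16 _ _ (by omega) (by omega)]
        have hf : ("+" ++ PySem.Int.toStr 13) = "+13" := by decide
        simp [hf, List.append_assoc]
      · by_cases h7 : 7 ≤ n
        · rw [calcA_loop, if_neg (by omega), if_pos (by omega), if_neg (by omega), if_neg (by omega),
              if_pos (by omega)]
          have hc : t - (n : Int) + 7 = t - ((n - 7 : Nat) : Int) := by omega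
          rw [hc, ih (n - 7) (by omega)]
          rw [calcB_skip (n : Int) 16 _ _ (by omega) (by omega),
              calcB_skip (n : Int) 13 _ _ (by omega) (by omega),
              calcB_take (n : Int) 7 _ _ (by norm_num) (by exact_mod_cast h7)]
          have hc2 : ((n : Int) - 7) = ((n - 7 : Nat) : Int) := by omega
          rw [hc2, calcB_skip ((n - 7 : Nat) : Int) 16 _ _ (by omega) (by omega),
              calcB_skip ((n - 7 : Nat) : Int) 13 _ _ (by omega) (by omega)]
          have hf : ("+" ++ PySem.Int.toStr 7) = "+7" := by decide
          simp [hf, List.append_assoc]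
        · by_cases h2 : 2 ≤ n
          · rw [calcA_loop, if_neg (by omega), if_pos (by omega), if_neg (by omega), if_neg (by omega),
                if_neg (by omega), if_pos (by omega)]
            have hc : t - (n : Int) + 2 = t - ((n - 2 : Nat) : Int) := by omega
            rw [hc, ih (n - 2) (by omega)]
            rw [calcB_skip (n : Int) 16 _ _ (by omega) (by omega),
                calcB_skip (n : Int) 13 _ _ (by omega) (by omega),
                calcB_skip (n : Int) 7 _ _ (by omega) (by omega),
                calcB_take (n : Int) 2 _ _ (by norm_num) (by exact_mod_cast h2)]
            have hc2 : ((n : Int) - 2) = ((n - 2 : Nat) : Int) := by omega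
            rw [hc2, calcB_skip ((n - 2 : Nat) : Int) 16 _ _ (by omega) (by omega),
                calcB_skip ((n - 2 : Nat) : Int) 13 _ _ (by omega) (by omega),
                calcB_skip ((n - 2 : Nat) : Int) 7 _ _ (by omega) (by omega)]
            have hf : ("+" ++ PySem.Int.toStr 2) = "+2" := by decide
            simp [hf, List.append_assoc]
          · rw [calcB_skip (n : Int) 16 _ _ (by omega) (by omega),
                calcB_skip (n : Int) 13 _ _ (by omega) (by omega),
                calcB_skip (n : Int) 7 _ _ (by omega) (by omega),
                calcB_skip (n : Int) 2 _ _ (by omega) (by omega), calcB_nil]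
            by_cases h0 : n = 0
            · subst h0
              rw [calcA_loop, if_pos (by omega)]
              simp
            · rw [calcA_loop, if_neg (by omega), if_pos (by omega), if_neg (by omega),
                  if_neg (by omega), if_neg (by omega), if_neg (by omega)]
              simp

lemma greedy_neg (n : Nat) : ∀ (t : Int) (acc : List String),
    calcA_loop t (t + n) acc
    = (acc ++ (calcB_digits n [15, 9, 6, 3] (fun b => "-" ++ PySem.Int.toStr b)).1,
       t + (calcB_digits n [15, 9, 6, 3] (fun b => "-" ++ PySem.Int.toStr b)).2) := by
  induction n using Nat.strong_induction_on with
  | _ n ih =>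
    intro t acc
    by_cases h15 : 15 ≤ n
    · rw [calcA_loop, if_neg (by omega), if_neg (by omega), if_pos (by omega)]
      have hc : t + (n : Int) + -15 = t + ((n - 15 : Nat) : Int) := by omega
      rw [hc, ih (n - 15) (by omega)]
      rw [calcB_take (n : Int) 15 _ _ (by norm_num) (by exact_mod_cast h15)]
      have hc2 : ((n : Int) - 15) = ((n - 15 : Nat) : Int) := by omega
      rw [hc2]
      have hf : ("-" ++ PySem.Int.toStr 15) = "-15" := by decide
      simp [hf, List.append_assoc]
    · by_cases h9 : 9 ≤ n
      · rw [calcA_loop, if_neg (by omega), if_neg (by omega), if_neg (by omega), if_pos (by omega)]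
        have hc : t + (n : Int) + -9 = t + ((n - 9 : Nat) : Int) := by omega
        rw [hc, ih (n - 9) (by omega)]
        rw [calcB_skip (n : Int) 15 _ _ (by omega) (by omega),
            calcB_take (n : Int) 9 _ _ (by norm_num) (by exact_mod_cast h9)]
        have hc2 : ((n : Int) - 9) = ((n - 9 : Nat) : Int) := by omega
        rw [hc2, calcB_skip ((n - 9 : Nat) : Int) 15 _ _ (by omega) (by omega)]
        have hf : ("-" ++ PySem.Int.toStr 9) = "-9" := by decide
        simp [hf, List.append_assoc]
      · by_cases h6 : 6 ≤ n
        · rw [calcA_loop, if_neg (by omega), if_neg (by omega), if_neg (by omega), if_neg (by omega),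
              if_pos (by omega)]
          have hc : t + (n : Int) + -6 = t + ((n - 6 : Nat) : Int) := by omega
          rw [hc, ih (n - 6) (by omega)]
          rw [calcB_skip (n : Int) 15 _ _ (by omega) (by omega),
              calcB_skip (n : Int) 9 _ _ (by omega) (by omega),
              calcB_take (n : Int) 6 _ _ (by norm_num) (by exact_mod_cast h6)]
          have hc2 : ((n : Int) - 6) = ((n - 6 : Nat) : Int) := by omega
          rw [hc2, calcB_skip ((n - 6 : Nat) : Int) 15 _ _ (by omega) (by omega),
              calcB_skip ((n - 6 : Nat) : Int) 9 _ _ (by omega) (by omega)]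
          have hf : ("-" ++ PySem.Int.toStr 6) = "-6" := by decide
          simp [hf, List.append_assoc]
        · by_cases h3 : 3 ≤ n
          · rw [calcA_loop, if_neg (by omega), if_neg (by omega), if_neg (by omega), if_neg (by omega),
                if_neg (by omega), if_pos (by omega)]
            have hc : t + (n : Int) + -3 = t + ((n - 3 : Nat) : Int) := by omega
            rw [hc, ih (n - 3) (by omega)]
            rw [calcB_skip (n : Int) 15 _ _ (by omega) (by omega),
                calcB_skip (n : Int) 9 _ _ (by omega) (by omega),
                calcB_skip (n : Int) 6 _ _ (by omega) (by omega),
                calcB_take (n : Int) 3 _ _ (by norm_num) (by exact_mod_cast h3)]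
            have hc2 : ((n : Int) - 3) = ((n - 3 : Nat) : Int) := by omega
            rw [hc2, calcB_skip ((n - 3 : Nat) : Int) 15 _ _ (by omega) (by omega),
                calcB_skip ((n - 3 : Nat) : Int) 9 _ _ (by omega) (by omega),
                calcB_skip ((n - 3 : Nat) : Int) 6 _ _ (by omega) (by omega)]
            have hf : ("-" ++ PySem.Int.toStr 3) = "-3" := by decide
            simp [hf, List.append_assoc]
          · rw [calcB_skip (n : Int) 15 _ _ (by omega) (by omega),
                calcB_skip (n : Int) 9 _ _ (by omega) (by omega),
                calcB_skip (n : Int) 6 _ _ (by omega) (by omega),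
                calcB_skip (n : Int) 3 _ _ (by omega) (by omega), calcB_nil]
            by_cases h0 : n = 0
            · subst h0
              rw [calcA_loop, if_pos (by omega)]
              simp
            · rw [calcA_loop, if_neg (by omega), if_neg (by omega), if_neg (by omega),
                  if_neg (by omega), if_neg (by omega), if_neg (by omega)]
              simp

lemma greedy_eq_start (pre : Int) :
    calcA_loop pre 0 []
    = (if 0 < pre then
        let p := calcB_digits pre [16, 13, 7, 2] (fun b => "+" ++ PySem.Int.toStr b)
        (p.1, pre - p.2)
      else if pre < 0 then
        let p := calcB_digits (-pre) [15, 9, 6, 3] (fun b => "-" ++ PySem.Int.toStr b)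
        (p.1, pre + p.2)
      else ([], (0 : Int))) := by
  rcases lt_trichotomy pre 0 with h | h | h
  · rw [if_neg (by omega), if_pos h]
    have hn : ((((-pre).toNat : Nat)) : Int) = -pre := by omega
    have h0 : (0 : Int) = pre + ((-pre).toNat : Nat) := by omega
    rw [h0, greedy_neg ((-pre).toNat) pre []]
    simp [hn]
  · subst h
    rw [calcA_loop, if_pos rfl]
    norm_num
  · rw [if_pos h]
    have hn : ((pre.toNat : Nat) : Int) = pre := by omega
    have h0 : (0 : Int) = pre - (pre.toNat : Nat) := by omega
    rw [h0, greedy_pos (pre.toNat) pre []]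
    simp [hn]

-- ===== VERDICT (by name: the statement is the Claim_ definition above) =====
theorem calcular_sequencia_spec : Claim_equal_calcular_sequencia := by
  intro nd seq _
  unfold Spec_calcular_sequencia calcular_sequencia calcular_sequencia_alt
  dsimp only
  rw [greedy_eq_start]
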